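-- pv_equiv track=rewrite | github.com/reecevela/cardcognition | backend/ml_scripts/converter.py | encode_power_or_toughness
-- ===== SOURCE A (Python) =====
-- def encode_power_or_toughness(value: str)-> list:
--     # Categories:
--     # 0: No power/NULL
--     # 1: Special/*
--     # 2: power >= 0
--     # 3: power >= 1
--     # ...
--     # 8: power >= 8
--     encodings = [0 for _ in range(9)]
--     if value is None or value == "":
--         encodings[0] = 1
--         return encodings
--     try:
--         value = int(value)
--     except:
--         encodings[1] = 1
--         return encodings
--     for i in range(2, 9):
--         if value >= i-2:
--             encodings[i] = 1
--     return encodings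
-- ===== SOURCE B (Python) =====
-- def encode_power_or_toughness(value: str) -> list:
--     if value is None or value == "":
--         return [1, 0, 0, 0, 0, 0, 0, 0, 0]
--     try:
--         v = int(value)
--     except Exception:
--         return [0, 1, 0, 0, 0, 0, 0, 0, 0]
--     upper = max(2, min(v + 3, 9))
--     return [0, 0] + [1] * (upper - 2) + [0] * (9 - upper)
-- ===== Notes on version B (the rewrite author's own statement) =====
-- stated objective: simpler
-- what changed: Replaces the per-index threshold comparison loop over indices 2..8 with a closed-form boundary: the ones occupy indices 2..upper-1 where upper = max(2, min(v+3, 9)), so the vector is built by concatenating two constant runs.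
import Mathlib
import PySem

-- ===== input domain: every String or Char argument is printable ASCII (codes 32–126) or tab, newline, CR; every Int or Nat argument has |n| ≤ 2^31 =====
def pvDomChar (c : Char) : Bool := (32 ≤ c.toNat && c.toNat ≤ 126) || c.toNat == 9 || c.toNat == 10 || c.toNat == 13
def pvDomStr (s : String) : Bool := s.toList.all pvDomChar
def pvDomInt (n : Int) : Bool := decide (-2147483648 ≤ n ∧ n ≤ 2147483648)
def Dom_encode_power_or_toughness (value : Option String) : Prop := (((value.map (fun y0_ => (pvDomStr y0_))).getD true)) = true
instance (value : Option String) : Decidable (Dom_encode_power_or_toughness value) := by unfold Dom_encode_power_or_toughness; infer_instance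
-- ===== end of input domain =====

-- B replaces A's per-index threshold loop with a closed-form boundary computation (objective: simpler).
-- ===== PORT A =====
def encode_power_or_toughness (value : Option String) : List Int :=
  let encodings : List Int := List.replicate 9 0
  -- 'value is None or value == ""'
  if value = none ∨ value = some "" then
    encodings.set 0 1
  else
    -- value is some s here; 'int(value)' with the except branch
    match PySem.Int.ofStr? (value.getD "") with
    | none => encodings.set 1 1
    | some v =>
      -- for i in range(2, 9): if value >= i-2: encodings[i] = 1
      (PySem.List.pyRange 2 9 1).foldl
        (fun enc i => if v ≥ i - 2 then enc.set i.toNat 1 else enc) encodings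

-- ===== PORT B =====
def encode_power_or_toughness_alt (value : Option String) : List Int :=
  match value with
  | none => [1, 0, 0, 0, 0, 0, 0, 0, 0]
  | some s =>
    if s = "" then [1, 0, 0, 0, 0, 0, 0, 0, 0]
    else
      match PySem.Int.ofStr? s with
      | none => [0, 1, 0, 0, 0, 0, 0, 0, 0]
      | some v =>
        let upper : Int := max 2 (min (v + 3) 9)
        [0, 0] ++ List.replicate (upper - 2).toNat 1 ++ List.replicate (9 - upper).toNat 0

-- ===== PRECONDITION & SPEC =====
def Spec_encode_power_or_toughness (value : Option String) (out : List Int) : Prop := out = encode_power_or_toughness_alt value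
instance (value : Option String) (out : List Int) : Decidable (Spec_encode_power_or_toughness value out) := by unfold Spec_encode_power_or_toughness; infer_instance

-- ===== CLAIM (what is proved, stated in full; the proofs are below) =====
def Claim_equal_encode_power_or_toughness : Prop := ∀ (value : Option String), Dom_encode_power_or_toughness value → Spec_encode_power_or_toughness value (encode_power_or_toughness value)

-- ===== LEMMAS AND PROOFS =====

-- ===== VERDICT (by name: the statement is the Claim_ definition above) =====
lemma core (v : Int) :
    (PySem.List.pyRange 2 9 1).foldl
        (fun enc i => if v ≥ i - 2 then enc.set i.toNat 1 else enc) (List.replicate 9 (0:Int))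
      = [0, 0] ++ List.replicate (max 2 (min (v + 3) 9) - 2).toNat (1:Int)
          ++ List.replicate (9 - max 2 (min (v + 3) 9)).toNat (0:Int) := by
  have hr : PySem.List.pyRange 2 9 1 = [2,3,4,5,6,7,8] := by decide
  rw [hr]
  by_cases h6 : 6 ≤ v
  · have hU : max 2 (min (v + 3) 9) = 9 := by omega
    rw [hU]
    simp only [List.foldl, if_pos (show v ≥ (2:Int) - 2 by omega),
      if_pos (show v ≥ (3:Int) - 2 by omega), if_pos (show v ≥ (4:Int) - 2 by omega),
      if_pos (show v ≥ (5:Int) - 2 by omega), if_pos (show v ≥ (6:Int) - 2 by omega),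
      if_pos (show v ≥ (7:Int) - 2 by omega), if_pos (show v ≥ (8:Int) - 2 by omega)]
    decide
  · by_cases h0 : v < 0
    · have hU : max 2 (min (v + 3) 9) = 2 := by omega
      rw [hU]
      simp only [List.foldl, if_neg (show ¬ v ≥ (2:Int) - 2 by omega),
        if_neg (show ¬ v ≥ (3:Int) - 2 by omega), if_neg (show ¬ v ≥ (4:Int) - 2 by omega),
        if_neg (show ¬ v ≥ (5:Int) - 2 by omega), if_neg (show ¬ v ≥ (6:Int) - 2 by omega),
        if_neg (show ¬ v ≥ (7:Int) - 2 by omega), if_neg (show ¬ v ≥ (8:Int) - 2 by omega)]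
      decide
    · have h0' : 0 ≤ v := by omega
      have h5 : v ≤ 5 := by omega
      interval_cases v <;> decide

theorem encode_power_or_toughness_spec : Claim_equal_encode_power_or_toughness := by
  intro value _
  unfold Spec_encode_power_or_toughness encode_power_or_toughness encode_power_or_toughness_alt
  match value with
  | none => simp
  | some s =>
    by_cases hs : s = ""
    · subst hs; simp
    · simp only [hs, if_neg, Option.getD_some, reduceCtorEq, Option.some.injEq, or_self,
        if_false]
      cases PySem.Int.ofStr? s with
      | none => simp
      | some v => simpa using core v
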